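-- pv_equiv track=rewrite | github.com/kleptsoved/pleasant-weather-prediction | 03_notebooks/src/file_handler.py | parse_selection
-- ===== SOURCE A (Python) =====
-- def parse_selection(selection_str, max_num):
--     """Parse comma-separated numbers and ranges into a list of indices."""
--     indices = []
--     parts = selection_str.split(',')
--
--     for part in parts:
--         part = part.strip()
--         if '-' in part:
--             # Handle range
--             start, end = part.split('-')
--             start = int(start.strip()) - 1
--             end = int(end.strip()) - 1
--             indices.extend(range(start, end + 1))
--         else:
--             # Single number
--             indices.append(int(part) - 1)
--
--     # Filter valid indices
--     valid_indices = [i for i in indices if 0 <= i < max_num]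
--     return sorted(set(valid_indices))
-- ===== SOURCE B (Python) =====
-- def parse_selection(selection_str, max_num):
--     """Parse comma-separated numbers and ranges into a list of indices."""
--     # Collect one clamped inclusive interval per comma part (a single number n is [n-1, n-1]).
--     intervals = []
--     for part in selection_str.split(','):
--         part = part.strip()
--         if '-' in part:
--             start, end = part.split('-')
--             lo = int(start.strip()) - 1
--             hi = int(end.strip()) - 1
--         else:
--             lo = hi = int(part) - 1
--         lo = max(lo, 0)
--         hi = min(hi, max_num - 1)
--         if lo <= hi:
--             intervals.append((lo, hi))
--     intervals.sort(key=lambda iv: iv[0])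
--     # Sweep the intervals in start order, emitting each index exactly once, already sorted.
--     result = []
--     for lo, hi in intervals:
--         if result and lo <= result[-1]:
--             lo = result[-1] + 1
--         result.extend(range(lo, hi + 1))
--     return result
-- ===== Notes on version B (the rewrite author's own statement) =====
-- stated objective: alternative
-- what changed: B replaces A's expand-all/filter/set-dedupe/sort-elements pipeline with an interval-merge sweep: each part becomes one clamped inclusive interval, the intervals are sorted by start, and a single sweep emits each index exactly once already in order, so no flat index list, no set and no element-level sort exist.
import Mathlib
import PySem

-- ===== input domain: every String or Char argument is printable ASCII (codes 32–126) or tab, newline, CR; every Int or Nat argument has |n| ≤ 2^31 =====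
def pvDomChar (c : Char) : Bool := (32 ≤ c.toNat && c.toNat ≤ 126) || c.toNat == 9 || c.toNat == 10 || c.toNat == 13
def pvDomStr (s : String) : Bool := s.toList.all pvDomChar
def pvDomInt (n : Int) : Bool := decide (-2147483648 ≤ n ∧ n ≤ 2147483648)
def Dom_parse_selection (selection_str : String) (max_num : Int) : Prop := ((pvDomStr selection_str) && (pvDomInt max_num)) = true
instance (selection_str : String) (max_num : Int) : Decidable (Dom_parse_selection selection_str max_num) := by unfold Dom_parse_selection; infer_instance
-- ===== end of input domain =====

-- B replaces A's expand/filter/dedupe/sort pipeline with an interval-merge sweep over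
-- start-sorted clamped intervals; equal return value on Pre_ (no mutation involved).

-- ===== PORT A =====
-- loop body of A: extend the flat index list by the parsed part (raising parses never occur under Pre_)
def pvStepA (acc : List Int) (part : List Char) : List Int :=
  let p := PySem.Chars.strip part
  if PySem.Chars.isIn ['-'] p then
    match PySem.Chars.splitOn p ['-'] with
    | [st, en] =>
      match PySem.Int.ofChars? (PySem.Chars.strip st), PySem.Int.ofChars? (PySem.Chars.strip en) with
      | some a, some b => acc ++ PySem.List.pyRange (a - 1) ((b - 1) + 1) 1
      | _, _ => acc        -- int() ValueError in Python; outside Pre_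
    | _ => acc             -- unpacking ValueError in Python; outside Pre_
  else
    match PySem.Int.ofChars? p with
    | some n => acc ++ [n - 1]
    | none => acc          -- int() ValueError in Python; outside Pre_

def parse_selection (selection_str : String) (max_num : Int) : List Int :=
  let indices := (PySem.Chars.splitOn selection_str.toList [',']).foldl pvStepA []
  let valid := indices.filter (fun i => decide (0 ≤ i ∧ i < max_num))
  PySem.List.sorted (PySem.Set.ofList valid) (fun x => x) false

-- ===== PORT B =====
-- loop body of B: parse the part to a raw interval, clamp it to [0, max_num), keep it if nonempty
def pvStepB (max_num : Int) (acc : List (Int × Int)) (part : List Char) : List (Int × Int) :=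
  let p := PySem.Chars.strip part
  match (if PySem.Chars.isIn ['-'] p then
           match PySem.Chars.splitOn p ['-'] with
           | [st, en] =>
             match PySem.Int.ofChars? (PySem.Chars.strip st), PySem.Int.ofChars? (PySem.Chars.strip en) with
             | some a, some b => some (a - 1, b - 1)
             | _, _ => none   -- int() ValueError in Python; outside Pre_
           | _ => none        -- unpacking ValueError in Python; outside Pre_
         else
           match PySem.Int.ofChars? p with
           | some n => some (n - 1, n - 1)
           | none => none     -- int() ValueError in Python; outside Pre_
        ) with
  | some (lo0, hi0) =>
      let lo := max lo0 0
      let hi := min hi0 (max_num - 1)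
      if lo ≤ hi then acc ++ [(lo, hi)] else acc
  | none => acc

-- sweep of Source B: emit each interval from max(lo, last+1), keeping the output sorted and duplicate-free
def pvSweep (res : List Int) (ivs : List (Int × Int)) : List Int :=
  match ivs with
  | [] => res
  | (lo, hi) :: rest =>
      let lo' := match res.getLast? with
        | some L => if lo ≤ L then L + 1 else lo
        | none => lo
      pvSweep (res ++ PySem.List.pyRange lo' (hi + 1) 1) rest

def parse_selection_alt (selection_str : String) (max_num : Int) : List Int :=
  let intervals := (PySem.Chars.splitOn selection_str.toList [',']).foldl (pvStepB max_num) []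
  pvSweep [] (PySem.List.sorted intervals (fun iv => iv.1) false)

-- ===== PRECONDITION & SPEC =====
-- a comma part parses without a ValueError: a single int, or exactly one '-' with an int on each side
def pvPartOK (part : List Char) : Bool :=
  let p := PySem.Chars.strip part
  if PySem.Chars.isIn ['-'] p then
    match PySem.Chars.splitOn p ['-'] with
    | [st, en] => (PySem.Int.ofChars? (PySem.Chars.strip st)).isSome
                  && (PySem.Int.ofChars? (PySem.Chars.strip en)).isSome
    | _ => false
  else (PySem.Int.ofChars? p).isSome

-- Pre_ excludes exactly the inputs where A raises ValueError (a comma part that is not an int: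
-- empty, a lone negative number, or a wrong piece count around the dash); B raises there too.
def Pre_parse_selection (selection_str : String) (max_num : Int) : Prop :=
  ∀ part ∈ PySem.Chars.splitOn selection_str.toList [','], pvPartOK part = true
instance (selection_str : String) (max_num : Int) : Decidable (Pre_parse_selection selection_str max_num) := by
  unfold Pre_parse_selection; infer_instance

def pvWitness_parse_selection : String × Int := ("1, 3-5, 2", 4)

def Spec_parse_selection (selection_str : String) (max_num : Int) (out : List Int) : Prop := out = parse_selection_alt selection_str max_num
instance (selection_str : String) (max_num : Int) (out : List Int) : Decidable (Spec_parse_selection selection_str max_num out) := by unfold Spec_parse_selection; infer_instance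

-- ===== CLAIM (what is proved, stated in full; the proofs are below) =====
def Claim_equal_parse_selection : Prop := ∀ (selection_str : String) (max_num : Int), Dom_parse_selection selection_str max_num → Pre_parse_selection selection_str max_num → Spec_parse_selection selection_str max_num (parse_selection selection_str max_num)

-- ===== LEMMAS AND PROOFS =====

-- x is covered by some interval of the list
def pvCov (ivs : List (Int × Int)) (x : Int) : Prop := ∃ iv ∈ ivs, iv.1 ≤ x ∧ x ≤ iv.2

lemma pvCov_append (acc : List (Int × Int)) (lo hi x : Int) :
    pvCov (acc ++ [(lo, hi)]) x ↔ pvCov acc x ∨ (lo ≤ x ∧ x ≤ hi) := by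
  constructor
  · rintro ⟨iv, hiv, h1, h2⟩
    rcases List.mem_append.1 hiv with hl | hr
    · exact Or.inl ⟨iv, hl, h1, h2⟩
    · rcases List.mem_singleton.1 hr with rfl
      exact Or.inr ⟨h1, h2⟩
  · rintro (⟨iv, hiv, h1, h2⟩ | ⟨h1, h2⟩)
    · exact ⟨iv, List.mem_append_left _ hiv, h1, h2⟩
    · exact ⟨(lo, hi), List.mem_append_right _ (List.mem_singleton.2 rfl), h1, h2⟩

-- per-part agreement: B's kept clamped interval covers exactly A's in-bounds indices of the part
lemma pvStep_cov (max_num : Int) (accB : List (Int × Int)) (accA : List Int) (part : List Char)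
    (hok : pvPartOK part = true)
    (h : ∀ x, pvCov accB x ↔ x ∈ accA.filter (fun i => decide (0 ≤ i ∧ i < max_num))) :
    ∀ x, pvCov (pvStepB max_num accB part) x ↔
      x ∈ (pvStepA accA part).filter (fun i => decide (0 ≤ i ∧ i < max_num)) := by
  intro x
  simp only [pvStepB, pvStepA]
  unfold pvPartOK at hok
  by_cases hin : PySem.Chars.isIn ['-'] (PySem.Chars.strip part) = true
  · rw [if_pos hin] at hok; rw [if_pos hin, if_pos hin]
    revert hok
    rcases PySem.Chars.splitOn (PySem.Chars.strip part) ['-'] with _ | ⟨st, _ | ⟨en, _ | _⟩⟩ <;>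
      dsimp only <;> intro hok
    · exact absurd hok (by decide)
    · exact absurd hok (by decide)
    · revert hok
      rcases PySem.Int.ofChars? (PySem.Chars.strip st) with _ | a <;>
        rcases PySem.Int.ofChars? (PySem.Chars.strip en) with _ | b <;>
          dsimp only <;> intro hok
      · exact absurd hok (by decide)
      · simp at hok
      · simp at hok
      · by_cases hk : max (a - 1) 0 ≤ min (b - 1) (max_num - 1)
        · rw [if_pos hk, pvCov_append, h x]
          simp only [List.filter_append, List.mem_append, List.mem_filter,
            PySem.List.mem_pyRange_one, decide_eq_true_eq]
          constructor
          · rintro (h1 | ⟨h1, h2⟩)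
            · exact Or.inl h1
            · exact Or.inr ⟨⟨by omega, by omega⟩, by omega, by omega⟩
          · rintro (h1 | ⟨⟨h1, h2⟩, h3, h4⟩)
            · exact Or.inl h1
            · exact Or.inr ⟨by omega, by omega⟩
        · rw [if_neg hk, h x]
          simp only [List.filter_append, List.mem_append, List.mem_filter,
            PySem.List.mem_pyRange_one, decide_eq_true_eq]
          constructor
          · exact Or.inl
          · rintro (h1 | ⟨⟨h1, h2⟩, h3, h4⟩)
            · exact h1
            · exact absurd hk (by omega)
    · exact absurd hok (by decide)
  · rw [if_neg hin] at hok; rw [if_neg hin, if_neg hin]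
    revert hok
    rcases PySem.Int.ofChars? (PySem.Chars.strip part) with _ | n <;> dsimp only <;> intro hok
    · exact absurd hok (by decide)
    · by_cases hk : max (n - 1) 0 ≤ min (n - 1) (max_num - 1)
      · rw [if_pos hk, pvCov_append, h x]
        simp only [List.filter_append, List.mem_append, List.mem_filter,
          List.mem_singleton, decide_eq_true_eq]
        constructor
        · rintro (h1 | ⟨h1, h2⟩)
          · exact Or.inl h1
          · exact Or.inr ⟨by omega, by omega, by omega⟩
        · rintro (h1 | ⟨h1, h2, h3⟩)
          · exact Or.inl h1
          · exact Or.inr ⟨by omega, by omega⟩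
      · rw [if_neg hk, h x]
        simp only [List.filter_append, List.mem_append, List.mem_filter,
          List.mem_singleton, decide_eq_true_eq]
        constructor
        · exact Or.inl
        · rintro (h1 | ⟨h1, h2, h3⟩)
          · exact h1
          · exact absurd hk (by omega)

lemma pvFold_cov (max_num : Int) :
    ∀ (parts : List (List Char)) (accB : List (Int × Int)) (accA : List Int),
      (∀ p ∈ parts, pvPartOK p = true) →
      (∀ x, pvCov accB x ↔ x ∈ accA.filter (fun i => decide (0 ≤ i ∧ i < max_num))) →
      ∀ x, pvCov (parts.foldl (pvStepB max_num) accB) x ↔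
        x ∈ (parts.foldl pvStepA accA).filter (fun i => decide (0 ≤ i ∧ i < max_num)) := by
  intro parts
  induction parts with
  | nil => intro accB accA _ h; exact h
  | cons p ps ih =>
      intro accB accA hok h
      simp only [List.foldl_cons]
      exact ih _ _ (fun q hq => hok q (List.mem_cons_of_mem _ hq))
        (pvStep_cov max_num accB accA p (hok p List.mem_cons_self) h)

-- in a strictly increasing list, getLast? bounds every member
lemma pv_le_getLast : ∀ (l : List Int), l.Pairwise (· < ·) →
    ∀ y ∈ l, ∃ L, l.getLast? = some L ∧ y ≤ L := by
  intro l
  induction l with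
  | nil => intro _ y hy; simp at hy
  | cons a t ih =>
      intro hl y hy
      cases t with
      | nil =>
          rcases List.mem_singleton.1 hy with rfl
          exact ⟨y, by simp, le_refl y⟩
      | cons b t' =>
          have hl' := List.pairwise_cons.1 hl
          rcases List.mem_cons.1 hy with rfl | hy'
          · obtain ⟨L, hL, hbL⟩ := ih hl'.2 b List.mem_cons_self
            have hab := hl'.1 b List.mem_cons_self
            exact ⟨L, by rw [List.getLast?_cons_cons]; exact hL, by omega⟩
          · obtain ⟨L, hL, hyL⟩ := ih hl'.2 y hy'
            exact ⟨L, by rw [List.getLast?_cons_cons]; exact hL, hyL⟩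

-- sweep invariant: over start-sorted intervals, the sweep keeps the output strictly
-- increasing and its members are exactly the old members plus the covered indices
lemma pvSweep_spec :
    ∀ (ivs : List (Int × Int)) (res : List Int),
      res.Pairwise (· < ·) →
      ivs.Pairwise (fun a b => a.1 ≤ b.1) →
      (∀ iv ∈ ivs, ∀ x, iv.1 ≤ x → (∃ y ∈ res, x ≤ y) → x ∈ res) →
      (pvSweep res ivs).Pairwise (· < ·) ∧
        ∀ x, x ∈ pvSweep res ivs ↔ x ∈ res ∨ pvCov ivs x := by
  intro ivs
  induction ivs with
  | nil =>
      intro res hres _ _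
      exact ⟨hres, fun x => by simp [pvSweep, pvCov]⟩
  | cons iv rest ih =>
      rcases iv with ⟨lo, hi⟩
      intro res hres hsort hfillable
      rw [pvSweep]
      set lo' : Int := (match res.getLast? with
        | some L => if lo ≤ L then L + 1 else lo
        | none => lo) with hlo'
      -- every element of res is strictly below lo'
      have hbelow : ∀ y ∈ res, y < lo' := by
        intro y hy
        obtain ⟨L, hL, hyL⟩ := pv_le_getLast res hres y hy
        rw [hlo', hL]
        dsimp only
        split_ifs <;> omega
      have hlo_le : lo ≤ lo' := by
        rw [hlo']
        rcases hgl : res.getLast? with _ | L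
        · exact le_refl lo
        · dsimp only; split_ifs <;> omega
      -- filling: an index below lo' but at least lo is already in res
      have hfill : ∀ x : Int, lo ≤ x → x < lo' → x ∈ res := by
        intro x hx hxlt
        rcases hgl : res.getLast? with _ | L
        · rw [hlo', hgl] at hxlt; dsimp only at hxlt; omega
        · rw [hlo', hgl] at hxlt; dsimp only at hxlt
          by_cases hc : lo ≤ L
          · rw [if_pos hc] at hxlt
            exact hfillable (lo, hi) List.mem_cons_self x hx
              ⟨L, List.mem_of_getLast? hgl, by omega⟩
          · rw [if_neg hc] at hxlt; omega
      have hres' : (res ++ PySem.List.pyRange lo' (hi + 1) 1).Pairwise (· < ·) := by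
        rw [List.pairwise_append]
        refine ⟨hres, PySem.List.pairwise_lt_pyRange_one _ _, ?_⟩
        intro y hy z hz
        have := PySem.List.mem_pyRange_one.1 hz
        have := hbelow y hy
        omega
      have hmem' : ∀ x : Int, x ∈ res ++ PySem.List.pyRange lo' (hi + 1) 1 ↔
          x ∈ res ∨ (lo ≤ x ∧ x ≤ hi) := by
        intro x
        rw [List.mem_append, PySem.List.mem_pyRange_one]
        constructor
        · rintro (h1 | h1)
          · exact Or.inl h1
          · exact Or.inr ⟨by omega, by omega⟩
        · rintro (h1 | ⟨h1, h2⟩)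
          · exact Or.inl h1
          · by_cases hge : lo' ≤ x
            · exact Or.inr ⟨hge, by omega⟩
            · exact Or.inl (hfill x h1 (by omega))
      have hfillable' : ∀ jv ∈ rest, ∀ x : Int, jv.1 ≤ x →
          (∃ y ∈ res ++ PySem.List.pyRange lo' (hi + 1) 1, x ≤ y) →
          x ∈ res ++ PySem.List.pyRange lo' (hi + 1) 1 := by
        rintro jv hjv x hx ⟨y, hy, hxy⟩
        have hlol : lo ≤ jv.1 := (List.pairwise_cons.1 hsort).1 jv hjv
        rcases List.mem_append.1 hy with hyres | hyrng
        · exact List.mem_append_left _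
            (hfillable jv (List.mem_cons_of_mem _ hjv) x hx ⟨y, hyres, hxy⟩)
        · have hyb := PySem.List.mem_pyRange_one.1 hyrng
          by_cases hge : lo' ≤ x
          · exact List.mem_append_right _
              (PySem.List.mem_pyRange_one.2 ⟨hge, by omega⟩)
          · exact List.mem_append_left _ (hfill x (by omega) (by omega))
      obtain ⟨hp, hm⟩ := ih (res ++ PySem.List.pyRange lo' (hi + 1) 1) hres'
        (List.pairwise_cons.1 hsort).2 hfillable'
      refine ⟨hp, fun x => ?_⟩
      rw [hm x, hmem' x]
      simp only [pvCov, List.mem_cons]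
      constructor
      · rintro ((h1 | ⟨h1, h2⟩) | ⟨jv, hjv, h1, h2⟩)
        · exact Or.inl h1
        · exact Or.inr ⟨(lo, hi), Or.inl rfl, h1, h2⟩
        · exact Or.inr ⟨jv, Or.inr hjv, h1, h2⟩
      · rintro (h1 | ⟨jv, rfl | hjv, h1, h2⟩)
        · exact Or.inl (Or.inl h1)
        · exact Or.inl (Or.inr ⟨h1, h2⟩)
        · exact Or.inr ⟨jv, hjv, h1, h2⟩

-- ===== VERDICT (by name: the statement is the Claim_ definition above) =====
theorem parse_selection_spec : Claim_equal_parse_selection := by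
  intro s m _ hpre
  unfold Spec_parse_selection parse_selection parse_selection_alt
  set parts := PySem.Chars.splitOn s.toList [','] with hparts
  set valid := (parts.foldl pvStepA []).filter (fun i => decide (0 ≤ i ∧ i < m)) with hvalid
  set ivs := parts.foldl (pvStepB m) [] with hivs
  set sivs := PySem.List.sorted ivs (fun iv => iv.1) false with hsivs
  -- coverage of the interval list = A's valid indices
  have hcov : ∀ x, pvCov ivs x ↔ x ∈ valid :=
    pvFold_cov m parts [] [] hpre (by simp [pvCov])
  have hcov' : ∀ x, pvCov sivs x ↔ x ∈ valid := by
    intro x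
    rw [← hcov x]
    simp [pvCov, hsivs, PySem.List.mem_sorted]
  -- the sweep over the start-sorted intervals
  obtain ⟨hp, hm⟩ := pvSweep_spec sivs [] List.Pairwise.nil
    (PySem.List.sorted_pairwise ivs (fun iv => iv.1))
    (by rintro iv _ x _ ⟨y, hy, _⟩; simp at hy)
  have hmem : ∀ x, x ∈ pvSweep [] sivs ↔ x ∈ PySem.Set.ofList valid := by
    intro x
    rw [hm x, PySem.Set.mem_ofList, ← hcov' x]
    simp
  apply PySem.List.sorted_eq_of_perm_of_pairwise_lt
  · exact (List.perm_ext_iff_of_nodup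
      (hp.imp fun h => ne_of_lt h) (PySem.Set.nodup_ofList valid)).2 hmem
  · exact hp
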